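-- pv_equiv track=rewrite | github.com/tollefj/UD-NARC | ud_narc/conversion/utils_ann.py | extract_token_mapping
-- ===== SOURCE A (Python) =====
-- from typing import Dict, List, Tuple
--
-- def extract_token_mapping(
--         text: str
-- ) -> Tuple[List[List[str]], List[str], Dict[int, int]]:
--
--     current_word_idx = 0
--     tokens = []
--     sentences = []
--
--     current_token = ""
--
--     current_sentence = []
--     char_to_word_map = {}
--
--     for char_index, char in enumerate(text):
--         char_to_word_map[char_index] = current_word_idx
--         if char in [" ", "\n"]:
--             tokens.append(current_token)
--             current_sentence.append(current_token)
--             current_token = ""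
--             current_word_idx += 1
--             if char == "\n":
--                 sentences.append(current_sentence)
--                 current_sentence = []
--         else:
--             current_token += char
--     return sentences, tokens, char_to_word_map
-- ===== SOURCE B (Python) =====
-- def extract_token_mapping(text):
--     # Split-based decomposition: lines -> sentences, flattened line tokens -> tokens,
--     # and the char->word map as a running prefix count of delimiters.
--     lines = text.split("\n")
--     sentences = [line.split(" ") for line in lines[:-1]]
--     tokens = [tok for line in lines for tok in line.split(" ")][:-1]
--     char_to_word_map = {}
--     words = 0
--     for i, c in enumerate(text):
--         char_to_word_map[i] = words
--         words += c in (" ", "\n")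
--     return sentences, tokens, char_to_word_map
-- ===== Notes on version B (the rewrite author's own statement) =====
-- stated objective: idiomatic
-- what changed: Replaces A's single character-by-character accumulator loop (growing token/sentence buffers and a word counter all at once) with the split-based decomposition: sentences = per-line ' '-splits of all newline-terminated lines, tokens = the flattened line splits minus the trailing remainder, and the char-to-word map as a separate running prefix count of delimiters.
import Mathlib
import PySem

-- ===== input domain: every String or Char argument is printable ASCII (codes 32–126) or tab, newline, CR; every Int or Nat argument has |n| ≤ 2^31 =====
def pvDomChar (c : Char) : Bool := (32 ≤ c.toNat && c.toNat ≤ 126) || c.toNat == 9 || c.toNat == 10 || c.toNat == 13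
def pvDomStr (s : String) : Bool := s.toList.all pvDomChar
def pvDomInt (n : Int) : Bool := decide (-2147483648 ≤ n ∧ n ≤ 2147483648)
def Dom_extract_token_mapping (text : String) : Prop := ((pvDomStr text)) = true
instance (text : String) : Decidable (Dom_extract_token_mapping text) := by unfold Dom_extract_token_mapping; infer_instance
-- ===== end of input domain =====

-- B re-implements A's single accumulating character loop as a split-based decomposition
-- (lines -> sentences, flattened line tokens -> tokens, map as a separate prefix-count
-- loop); objective: idiomatic, same return value on every input.

-- ===== PORT A =====
-- A-side helper: the body of A's for-loop. State = (current_word_idx, tokens, sentences,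
-- current_token, current_sentence, char_to_word_map); the growing current_token is carried
-- as List Char ('current_token += char') and frozen with String.ofList where Python appends it.
def emStepA
    (s : Int × List (List Char) × List (List (List Char)) × List Char × List (List Char) × PySem.Dict Int Int)
    (p : Int × Char) :
    Int × List (List Char) × List (List (List Char)) × List Char × List (List Char) × PySem.Dict Int Int :=
  let d := s.2.2.2.2.2.insert p.1 s.1
  if p.2 = ' ' ∨ p.2 = '\n' then
    let tokens := s.2.1 ++ [s.2.2.2.1]
    let curSent := s.2.2.2.2.1 ++ [s.2.2.2.1]
    if p.2 = '\n' then (s.1 + 1, tokens, s.2.2.1 ++ [curSent], [], [], d)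
    else (s.1 + 1, tokens, s.2.2.1, [], curSent, d)
  else (s.1, s.2.1, s.2.2.1, s.2.2.2.1 ++ [p.2], s.2.2.2.2.1, d)

def extract_token_mapping (text : String) : List (List String) × List String × (List (Int × Int)) :=
  let r := (PySem.List.enumerate text.toList 0).foldl emStepA ((0 : Int), [], [], [], [], PySem.Dict.empty)
  (r.2.2.1.map (fun s => s.map String.ofList), r.2.1.map String.ofList, r.2.2.2.2.2.items)

-- ===== PORT B =====
-- B-side helper: the body of B's char->word prefix-count loop ('words += c in (" ", "\n")')
def emStepB (st : PySem.Dict Int Int × Int) (p : Int × Char) : PySem.Dict Int Int × Int :=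
  (st.1.insert p.1 st.2, st.2 + (if p.2 = ' ' ∨ p.2 = '\n' then 1 else 0))

-- s.split(sep) with a literal nonempty sep is exactly PySem.Chars.splitOn; xs[:-1] is
-- PySem.List.slice xs none (some (-1)).
def extract_token_mapping_alt (text : String) : List (List String) × List String × (List (Int × Int)) :=
  let lines := PySem.Chars.splitOn text.toList ['\n']
  let sentences := (PySem.List.slice lines none (some (-1))).map
      (fun line => (PySem.Chars.splitOn line [' ']).map String.ofList)
  let tokens := PySem.List.slice
      (lines.flatMap (fun line => (PySem.Chars.splitOn line [' ']).map String.ofList)) none (some (-1))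
  let m := (PySem.List.enumerate text.toList 0).foldl emStepB (PySem.Dict.empty, (0 : Int))
  (sentences, tokens, m.1.items)

-- ===== PRECONDITION & SPEC =====
def Spec_extract_token_mapping (text : String) (out : List (List String) × List String × (List (Int × Int))) : Prop := out = extract_token_mapping_alt text
instance (text : String) (out : List (List String) × List String × (List (Int × Int))) : Decidable (Spec_extract_token_mapping text out) := by unfold Spec_extract_token_mapping; infer_instance

-- ===== CLAIM (what is proved, stated in full; the proofs are below) =====
def Claim_equal_extract_token_mapping : Prop := ∀ (text : String), Dom_extract_token_mapping text → Spec_extract_token_mapping text (extract_token_mapping text)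

-- ===== LEMMAS AND PROOFS =====

-- prepend a char to the first segment (used to characterise splitting)
def emConsHd (c : Char) : List (List Char) → List (List Char)
  | [] => [[c]]
  | h :: t => (c :: h) :: t

-- prepend a prefix to the first segment
def emConsHdApp (p : List Char) : List (List Char) → List (List Char)
  | [] => [p]
  | h :: t => (p ++ h) :: t

-- split on one delimiter character
def emSplitC (d : Char) : List Char → List (List Char)
  | [] => [[]]
  | c :: cs => if c = d then [] :: emSplitC d cs else emConsHd c (emSplitC d cs)

-- split on either delimiter
def emSplitB : List Char → List (List Char)
  | [] => [[]]
  | c :: cs => if c = ' ' ∨ c = '\n' then [] :: emSplitB cs else emConsHd c (emSplitB cs)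

-- tokens A's loop appends while consuming cs, starting from current_token = cur
def emTokensAdd (cur : List Char) : List Char → List (List Char)
  | [] => []
  | c :: cs => if c = ' ' ∨ c = '\n' then cur :: emTokensAdd [] cs else emTokensAdd (cur ++ [c]) cs

-- sentences A's loop appends
def emSentsAdd (cur : List Char) (curSent : List (List Char)) : List Char → List (List (List Char))
  | [] => []
  | c :: cs =>
    if c = ' ' ∨ c = '\n' then
      if c = '\n' then (curSent ++ [cur]) :: emSentsAdd [] [] cs
      else emSentsAdd [] (curSent ++ [cur]) cs
    else emSentsAdd (cur ++ [c]) curSent cs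

-- final current_token / current_sentence
def emCurFin (cur : List Char) : List Char → List Char
  | [] => cur
  | c :: cs => if c = ' ' ∨ c = '\n' then emCurFin [] cs else emCurFin (cur ++ [c]) cs

def emCurSentFin (cur : List Char) (curSent : List (List Char)) : List Char → List (List Char)
  | [] => curSent
  | c :: cs =>
    if c = ' ' ∨ c = '\n' then
      if c = '\n' then emCurSentFin [] [] cs
      else emCurSentFin [] (curSent ++ [cur]) cs
    else emCurSentFin (cur ++ [c]) curSent cs

def emCount : List Char → Int
  | [] => 0
  | c :: cs => (if c = ' ' ∨ c = '\n' then 1 else 0) + emCount cs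

-- the (index, running word count) pairs both dict loops append
def emSeg : List Char → Int → Int → List (Int × Int)
  | [], _, _ => []
  | c :: cs, k, w => (k, w) :: emSeg cs (k + 1) (w + if c = ' ' ∨ c = '\n' then 1 else 0)

def emMapHd (f g : List Char → List (List Char)) : List (List Char) → List (List (List Char))
  | [] => []
  | h :: t => f h :: t.map g

lemma emSplitC_ne_nil (d : Char) (l : List Char) : emSplitC d l ≠ [] := by
  cases l with
  | nil => simp [emSplitC]
  | cons c cs =>
    simp only [emSplitC]
    split
    · simp
    · cases h : emSplitC d cs <;> simp [emConsHd]

lemma emSplitB_ne_nil (l : List Char) : emSplitB l ≠ [] := by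
  cases l with
  | nil => simp [emSplitB]
  | cons c cs =>
    simp only [emSplitB]
    split
    · simp
    · cases h : emSplitB cs <;> simp [emConsHd]

lemma emConsHd_append (c : Char) (A B : List (List Char)) (h : A ≠ []) :
    emConsHd c (A ++ B) = emConsHd c A ++ B := by
  cases A with
  | nil => exact absurd rfl h
  | cons a t => simp [emConsHd]

lemma emConsHdApp_nil (L : List (List Char)) (h : L ≠ []) : emConsHdApp [] L = L := by
  cases L with
  | nil => exact absurd rfl h
  | cons a t => simp [emConsHdApp]

lemma emConsHdApp_consHd (p : List Char) (c : Char) (L : List (List Char)) :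
    emConsHdApp p (emConsHd c L) = emConsHdApp (p ++ [c]) L := by
  cases L <;> simp [emConsHd, emConsHdApp]

lemma emConsHd_consHdApp (c : Char) (p : List Char) (L : List (List Char)) :
    emConsHd c (emConsHdApp p L) = emConsHdApp (c :: p) L := by
  cases L <;> simp [emConsHd, emConsHdApp]

lemma emSplitC_cons_self (d : Char) (cs : List Char) :
    emSplitC d (d :: cs) = [] :: emSplitC d cs := by simp [emSplitC]

lemma emSplitC_cons_ne (d c : Char) (cs : List Char) (h : c ≠ d) :
    emSplitC d (c :: cs) = emConsHd c (emSplitC d cs) := by simp [emSplitC, h]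

lemma emSplitB_cons_delim (c : Char) (cs : List Char) (h : c = ' ' ∨ c = '\n') :
    emSplitB (c :: cs) = [] :: emSplitB cs := by simp [emSplitB, h]

lemma emSentsAdd_cons_nl (cur : List Char) (curSent : List (List Char)) (cs : List Char) :
    emSentsAdd cur curSent ('\n' :: cs) = (curSent ++ [cur]) :: emSentsAdd [] [] cs := by
  simp [emSentsAdd]

lemma emSentsAdd_cons_sp (cur : List Char) (curSent : List (List Char)) (cs : List Char) :
    emSentsAdd cur curSent (' ' :: cs) = emSentsAdd [] (curSent ++ [cur]) cs := by
  simp [emSentsAdd]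

lemma emSentsAdd_cons_other (cur : List Char) (curSent : List (List Char)) (c : Char)
    (cs : List Char) (hd : ¬(c = ' ' ∨ c = '\n')) :
    emSentsAdd cur curSent (c :: cs) = emSentsAdd (cur ++ [c]) curSent cs := by
  simp [emSentsAdd, hd]

lemma emGo (d : Char) : ∀ (l : List Char) (fuel : Nat) (cur : List Char) (acc : List (List Char)),
    l.length < fuel →
    PySem.Chars.splitOn.go [d] fuel l cur acc = acc.reverse ++ emConsHdApp cur.reverse (emSplitC d l) := by
  intro l
  induction l with
  | nil =>
    intro fuel cur acc hf
    obtain ⟨n, rfl⟩ : ∃ n, fuel = n + 1 := ⟨fuel - 1, by omega⟩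
    rw [PySem.Chars.splitOn.go.eq_def]
    simp [emSplitC, emConsHdApp]
  | cons c rest ih =>
    intro fuel cur acc hf
    obtain ⟨n, rfl⟩ : ∃ n, fuel = n + 1 := ⟨fuel - 1, by omega⟩
    rw [PySem.Chars.splitOn.go.eq_def]
    simp only [List.isPrefixOf, List.isPrefixOf_nil_left, Bool.and_true]
    by_cases hc : c = d
    · subst hc
      simp only [beq_self_eq_true, if_pos, List.length_cons, List.length_nil,
        List.drop_succ_cons, List.drop_zero]
      rw [ih n [] (cur.reverse :: acc) (by simpa using Nat.lt_of_succ_lt_succ hf)]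
      rw [emSplitC_cons_self, List.reverse_nil,
        emConsHdApp_nil _ (emSplitC_ne_nil c _)]
      simp [emConsHdApp]
    · have : (d == c) = false := by simp [BEq.comm]; exact fun h => hc h.symm
      simp only [this, Bool.false_eq_true, if_neg, not_false_iff]
      rw [ih n (c :: cur) acc (by simpa using Nat.lt_of_succ_lt_succ hf)]
      simp only [List.reverse_cons, emSplitC, hc, if_neg, emConsHdApp_consHd]
      simp [emConsHd_consHdApp, emConsHdApp_consHd, hc]

lemma emSplitOn_single (d : Char) (l : List Char) :
    PySem.Chars.splitOn l [d] = emSplitC d l := by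
  show PySem.Chars.splitOn.go [d] (l.length + 1) l [] [] = _
  rw [emGo d l (l.length + 1) [] [] (by omega)]
  simp [emConsHdApp_nil _ (emSplitC_ne_nil d l)]

lemma emSplitC_append_nodelim (d : Char) (p l : List Char) (h : ∀ x ∈ p, x ≠ d) :
    emSplitC d (p ++ l) = emConsHdApp p (emSplitC d l) := by
  induction p with
  | nil => simp [emConsHdApp_nil _ (emSplitC_ne_nil d l)]
  | cons c t ih =>
    have hc : c ≠ d := h c (by simp)
    simp only [List.cons_append, emSplitC, hc, if_neg, not_false_iff]
    rw [ih (fun x hx => h x (by simp [hx]))]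
    rw [emConsHd_consHdApp]

lemma emFlat : ∀ cs : List Char,
    (emSplitC '\n' cs).flatMap (emSplitC ' ') = emSplitB cs := by
  intro cs
  induction cs with
  | nil => simp [emSplitC, emSplitB]
  | cons c cs ih =>
    by_cases hn : c = '\n'
    · subst hn
      rw [emSplitC_cons_self, List.flatMap_cons, ih,
        emSplitB_cons_delim _ _ (Or.inr rfl)]
      simp [emSplitC]
    · obtain ⟨h, t, hht⟩ : ∃ h t, emSplitC '\n' cs = h :: t := by
        cases hE : emSplitC '\n' cs with
        | nil => exact absurd hE (emSplitC_ne_nil _ _)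
        | cons a b => exact ⟨a, b, rfl⟩
      have ihx : emSplitC ' ' h ++ t.flatMap (emSplitC ' ') = emSplitB cs := by
        have := ih; rw [hht] at this; simpa [List.flatMap_cons] using this
      by_cases hs : c = ' '
      · subst hs
        rw [emSplitC_cons_ne _ _ _ hn, hht,
          show emConsHd ' ' (h :: t) = (' ' :: h) :: t from rfl,
          List.flatMap_cons, emSplitC_cons_self, List.cons_append, ihx,
          emSplitB_cons_delim _ _ (Or.inl rfl)]
      · have hd : ¬(c = ' ' ∨ c = '\n') := by tauto
        rw [emSplitC_cons_ne _ _ _ hn, hht,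
          show emConsHd c (h :: t) = (c :: h) :: t from rfl,
          List.flatMap_cons, emSplitC_cons_ne _ _ _ hs,
          ← emConsHd_append _ _ _ (emSplitC_ne_nil ' ' h), ihx]
        simp [emSplitB, hd]

lemma emTokensAdd_eq : ∀ (cs cur : List Char),
    emTokensAdd cur cs = (emConsHdApp cur (emSplitB cs)).dropLast := by
  intro cs
  induction cs with
  | nil => intro cur; simp [emTokensAdd, emSplitB, emConsHdApp]
  | cons c cs ih =>
    intro cur
    by_cases hd : c = ' ' ∨ c = '\n'
    · simp only [emTokensAdd, emSplitB, if_pos hd, emConsHdApp]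
      rw [List.dropLast_cons_of_ne_nil (emSplitB_ne_nil cs)]
      rw [ih [], emConsHdApp_nil _ (emSplitB_ne_nil cs)]
      simp
    · simp only [emTokensAdd, emSplitB, if_neg hd]
      rw [emConsHdApp_consHd, ih]

lemma emMapHd_eq_map (g : List Char → List (List Char)) (L : List (List Char)) :
    emMapHd g g L = L.map g := by
  cases L <;> simp [emMapHd]

lemma emSentsAdd_eq : ∀ (cs cur : List Char) (curSent : List (List Char)),
    (∀ x ∈ cur, ¬(x = ' ' ∨ x = '\n')) →
    emSentsAdd cur curSent cs =
      emMapHd (fun l => curSent ++ emSplitC ' ' (cur ++ l)) (emSplitC ' ')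
        ((emSplitC '\n' cs).dropLast) := by
  intro cs
  induction cs with
  | nil => intro cur curSent _; simp [emSentsAdd, emSplitC, emMapHd]
  | cons c cs ih =>
    intro cur curSent hcur
    have hcurS : ∀ x ∈ cur, x ≠ ' ' := fun x hx he => hcur x hx (Or.inl he)
    by_cases hn : c = '\n'
    · subst hn
      rw [emSentsAdd_cons_nl, emSplitC_cons_self,
        List.dropLast_cons_of_ne_nil (emSplitC_ne_nil _ _), ih [] [] (by simp)]
      have hcc : emSplitC ' ' cur = [cur] := by
        have := emSplitC_append_nodelim ' ' cur [] hcurS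
        simpa [emSplitC, emConsHdApp] using this
      have h1 : (fun l => ([] : List (List Char)) ++ emSplitC ' ' ([] ++ l)) = emSplitC ' ' := by
        funext l; simp
      rw [h1, emMapHd_eq_map]
      simp [emMapHd, hcc]
    · obtain ⟨h, t, hht⟩ : ∃ h t, emSplitC '\n' cs = h :: t := by
        cases hE : emSplitC '\n' cs with
        | nil => exact absurd hE (emSplitC_ne_nil _ _)
        | cons a b => exact ⟨a, b, rfl⟩
      by_cases hs : c = ' '
      · subst hs
        rw [emSentsAdd_cons_sp, emSplitC_cons_ne _ _ _ hn, hht,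
          show emConsHd ' ' (h :: t) = (' ' :: h) :: t from rfl,
          ih [] (curSent ++ [cur]) (by simp), hht]
        cases t with
        | nil => simp [emMapHd]
        | cons a b =>
          rw [List.dropLast_cons_of_ne_nil (x := h) (l := a :: b) (by simp),
            List.dropLast_cons_of_ne_nil (x := ' ' :: h) (l := a :: b) (by simp)]
          have hsplit : emSplitC ' ' (cur ++ ' ' :: h) = cur :: emSplitC ' ' h := by
            rw [emSplitC_append_nodelim ' ' cur (' ' :: h) hcurS, emSplitC_cons_self]
            simp [emConsHdApp]
          simp [emMapHd, hsplit, List.map_dropLast]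
      · have hd : ¬(c = ' ' ∨ c = '\n') := by tauto
        rw [emSentsAdd_cons_other _ _ _ _ hd, emSplitC_cons_ne _ _ _ hn, hht,
          show emConsHd c (h :: t) = (c :: h) :: t from rfl,
          ih (cur ++ [c]) curSent (by
            intro x hx
            rcases List.mem_append.mp hx with h1 | h1
            · exact hcur x h1
            · simp at h1; subst h1; exact hd), hht]
        cases t with
        | nil => simp [emMapHd]
        | cons a b =>
          rw [List.dropLast_cons_of_ne_nil (x := h) (l := a :: b) (by simp),
            List.dropLast_cons_of_ne_nil (x := c :: h) (l := a :: b) (by simp)]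
          simp [emMapHd, List.append_assoc, List.map_dropLast]

lemma emRunA : ∀ (cs : List Char) (k w : Int) (toks : List (List Char))
    (sents : List (List (List Char))) (cur : List Char) (curSent : List (List Char))
    (dd : PySem.Dict Int Int), (∀ j ∈ dd.keys, j < k) →
    (PySem.List.enumerate cs k).foldl emStepA (w, toks, sents, cur, curSent, dd) =
      (w + emCount cs, toks ++ emTokensAdd cur cs, sents ++ emSentsAdd cur curSent cs,
       emCurFin cur cs, emCurSentFin cur curSent cs, PySem.Dict.mk (dd.items ++ emSeg cs k w)) := by
  intro cs
  induction cs with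
  | nil =>
    intro k w toks sents cur curSent dd _
    simp [PySem.List.enumerate_nil, emCount, emTokensAdd, emSentsAdd, emCurFin, emCurSentFin, emSeg]
  | cons c cs ih =>
    intro k w toks sents cur curSent dd hk
    rw [PySem.List.enumerate_cons, List.foldl_cons]
    have hnc : dd.contains k = false := by
      rw [PySem.Dict.contains_eq_decide_mem_keys]
      simp only [decide_eq_false_iff_not]
      intro hmem
      have := hk k hmem
      omega
    have hkeys : (dd.insert k w).keys = dd.keys ++ [k] :=
      PySem.Dict.keys_insert_of_not_contains dd w hnc
    have hitems : (dd.insert k w).items = dd.items ++ [(k, w)] :=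
      PySem.Dict.items_insert_of_not_contains dd w hnc
    have hk' : ∀ j ∈ (dd.insert k w).keys, j < k + 1 := by
      intro j hj
      rw [hkeys] at hj
      rcases List.mem_append.mp hj with h1 | h1
      · have := hk j h1; omega
      · simp at h1; omega
    by_cases hn : c = '\n'
    · subst hn
      have hstep : emStepA (w, toks, sents, cur, curSent, dd) (k, '\n')
          = (w + 1, toks ++ [cur], sents ++ [curSent ++ [cur]], [], [], dd.insert k w) := by
        simp [emStepA]
      rw [hstep, ih (k + 1) (w + 1) _ _ _ _ _ hk', hitems]
      simp only [Prod.mk.injEq]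
      refine ⟨?_, ?_, ?_, ?_, ?_, ?_⟩
      · simp only [emCount]; simp; omega
      · simp [emTokensAdd]
      · simp [emSentsAdd]
      · simp [emCurFin]
      · simp [emCurSentFin]
      · simp [emSeg, List.append_assoc]
    · by_cases hs : c = ' '
      · subst hs
        have hstep : emStepA (w, toks, sents, cur, curSent, dd) (k, ' ')
            = (w + 1, toks ++ [cur], sents, [], curSent ++ [cur], dd.insert k w) := by
          simp [emStepA]
        rw [hstep, ih (k + 1) (w + 1) _ _ _ _ _ hk', hitems]
        simp only [Prod.mk.injEq]
        refine ⟨?_, ?_, ?_, ?_, ?_, ?_⟩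
        · simp only [emCount]; simp; omega
        · simp [emTokensAdd]
        · simp [emSentsAdd]
        · simp [emCurFin]
        · simp [emCurSentFin]
        · simp [emSeg, List.append_assoc]
      · have hd : ¬(c = ' ' ∨ c = '\n') := by tauto
        have hstep : emStepA (w, toks, sents, cur, curSent, dd) (k, c)
            = (w, toks, sents, cur ++ [c], curSent, dd.insert k w) := by
          simp [emStepA, hd]
        rw [hstep, ih (k + 1) w _ _ _ _ _ hk', hitems]
        simp only [Prod.mk.injEq]
        refine ⟨?_, ?_, ?_, ?_, ?_, ?_⟩
        · simp [emCount, hd]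
        · simp [emTokensAdd, hd]
        · simp [emSentsAdd, hd]
        · simp [emCurFin, hd]
        · simp [emCurSentFin, hd]
        · simp [emSeg, hd, List.append_assoc]

lemma emRunB : ∀ (cs : List Char) (k cnt : Int) (dd : PySem.Dict Int Int),
    (∀ j ∈ dd.keys, j < k) →
    (PySem.List.enumerate cs k).foldl emStepB (dd, cnt) =
      (PySem.Dict.mk (dd.items ++ emSeg cs k cnt), cnt + emCount cs) := by
  intro cs
  induction cs with
  | nil =>
    intro k cnt dd _
    simp [PySem.List.enumerate_nil, emSeg, emCount]
  | cons c cs ih =>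
    intro k cnt dd hk
    rw [PySem.List.enumerate_cons, List.foldl_cons]
    have hnc : dd.contains k = false := by
      rw [PySem.Dict.contains_eq_decide_mem_keys]
      simp only [decide_eq_false_iff_not]
      intro hmem
      have := hk k hmem
      omega
    have hkeys : (dd.insert k cnt).keys = dd.keys ++ [k] :=
      PySem.Dict.keys_insert_of_not_contains dd cnt hnc
    have hitems : (dd.insert k cnt).items = dd.items ++ [(k, cnt)] :=
      PySem.Dict.items_insert_of_not_contains dd cnt hnc
    have hk' : ∀ j ∈ (dd.insert k cnt).keys, j < k + 1 := by
      intro j hj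
      rw [hkeys] at hj
      rcases List.mem_append.mp hj with h1 | h1
      · have := hk j h1; omega
      · simp at h1; omega
    have hstep : emStepB (dd, cnt) (k, c)
        = (dd.insert k cnt, cnt + (if c = ' ' ∨ c = '\n' then 1 else 0)) := rfl
    rw [hstep, ih (k + 1) _ _ hk', hitems]
    simp only [Prod.mk.injEq]
    constructor
    · simp [emSeg, List.append_assoc]
    · simp only [emCount]; omega

lemma emKeysEmpty : ∀ j ∈ (PySem.Dict.empty : PySem.Dict Int Int).keys, j < (0 : Int) := by
  intro j hj
  simp [PySem.Dict.keys_empty] at hj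

-- ===== VERDICT (by name: the statement is the Claim_ definition above) =====
theorem extract_token_mapping_spec : Claim_equal_extract_token_mapping := by
  unfold Claim_equal_extract_token_mapping
  intro text _
  unfold Spec_extract_token_mapping extract_token_mapping extract_token_mapping_alt
  rw [emRunA text.toList 0 0 [] [] [] [] PySem.Dict.empty emKeysEmpty]
  rw [emRunB text.toList 0 0 PySem.Dict.empty emKeysEmpty]
  simp only [emSplitOn_single]
  refine congrArg₂ _ ?_ (congrArg₂ _ ?_ ?_)
  · -- sentences
    show List.map _ ([] ++ emSentsAdd [] [] text.toList) = _
    rw [List.nil_append, emSentsAdd_eq text.toList [] [] (by simp)]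
    rw [PySem.List.slice_to_neg_one]
    have : (fun l => [] ++ emSplitC ' ' ([] ++ l)) = emSplitC ' ' := by
      funext l; simp
    rw [this, emMapHd_eq_map]
    simp [List.map_map, Function.comp_def]
  · -- tokens
    show List.map String.ofList ([] ++ emTokensAdd [] text.toList) = _
    rw [List.nil_append, emTokensAdd_eq text.toList [],
      emConsHdApp_nil _ (emSplitB_ne_nil text.toList)]
    rw [PySem.List.slice_to_neg_one]
    have hf : (emSplitC '\n' text.toList).flatMap
        (fun line => (emSplitC ' ' line).map String.ofList)
        = ((emSplitC '\n' text.toList).flatMap (emSplitC ' ')).map String.ofList := by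
      rw [List.map_flatMap]
    rw [hf, emFlat, List.map_dropLast]
  · -- char_to_word_map
    show (PySem.Dict.mk ((PySem.Dict.empty : PySem.Dict Int Int).items ++ emSeg text.toList 0 0)).items = _
    rfl
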